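-- pv_equiv track=rewrite | github.com/MazenAtlam/IEEE_practice | Sheets/sheet_2/M.py | is_good_k
-- ===== SOURCE A (Python) =====
-- def int_listing(num):
--     length = 0
--     digits = []
--
--     if num == 0:
--         return [0], 1
--
--     while num != 0:
--         length += 1
--         digits.append(num % 10)
--         num //= 10
--
--     return digits, length
--
-- def is_good_k(num, k):
--     if num == 0:
--         return False
--
--     digits, num_len = int_listing(num)
--     if num_len != k + 1:
--         return False
--
--     digits.sort()
--     for i in range(num_len - 1):
--         if digits[i] == digits[i + 1] or digits[i] > k:
--             return False
--
--     if digits[num_len - 1] > k: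
--         return False
--
--     return True
-- ===== SOURCE B (Python) =====
-- def is_good_k(num, k):
--     if num == 0:
--         return False
--     digits = []
--     n = num
--     while n != 0:
--         digits.append(n % 10)
--         n //= 10
--     if len(digits) != k + 1:
--         return False
--     seen = set()
--     for d in digits:
--         if d > k or d in seen:
--             return False
--         seen.add(d)
--     return True
-- ===== Notes on version B (the rewrite author's own statement) =====
-- stated objective: simpler
-- what changed: Replaced sort-then-adjacent-pair scan (plus a separate last-element check) by a single pass over the unsorted digits with a seen-set that rejects on the first repeated or too-large digit.
import Mathlib
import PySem

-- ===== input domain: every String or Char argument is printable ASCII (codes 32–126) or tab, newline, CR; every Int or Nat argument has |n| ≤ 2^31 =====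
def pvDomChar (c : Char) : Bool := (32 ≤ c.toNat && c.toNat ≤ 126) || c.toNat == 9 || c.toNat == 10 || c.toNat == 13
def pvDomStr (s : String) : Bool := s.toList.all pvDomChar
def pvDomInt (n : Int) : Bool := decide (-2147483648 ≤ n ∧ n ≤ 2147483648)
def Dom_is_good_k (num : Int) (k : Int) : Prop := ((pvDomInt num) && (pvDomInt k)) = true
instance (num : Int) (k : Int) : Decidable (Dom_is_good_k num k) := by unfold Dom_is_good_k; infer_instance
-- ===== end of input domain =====

-- ===== PORT A =====
-- B replaces A's sort + adjacent-pair scan by one seen-set pass over the unsorted digits (simpler).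
-- A's while-loop: for num < 0 Python never terminates (num //= 10 stalls at -1); Pre_ excludes that.
-- The loop is transcribed with a fuel counter (num.toNat + 1 steps always suffice, the loop divides
-- num by 10 each round); fuel only makes the recursion total, it changes no computed value.
def int_listing_go (fuel : Nat) (num : Int) (digits : List Int) (length : Int) : List Int × Int :=
  match fuel with
  | 0 => (digits, length)
  | fuel + 1 =>
    if num = 0 then (digits, length)
    else if 0 < num then
      int_listing_go fuel (PySem.Int.floordiv num 10) (digits ++ [PySem.Int.mod num 10]) (length + 1)
    else (digits, length)  -- unreachable under Pre_ (Python would loop forever)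

def int_listing (num : Int) : List Int × Int :=
  if num = 0 then ([0], 1) else int_listing_go (num.toNat + 1) num [] 0

-- the loop 'for i in range(num_len - 1): if digits[i] == digits[i+1] or digits[i] > k: return False',
-- transcribed as a scan over consecutive pairs (same comparisons, same order)
def adjScan (k : Int) : List Int → Bool
  | a :: b :: rest => if a == b || a > k then false else adjScan k (b :: rest)
  | _ => true

def is_good_k (num : Int) (k : Int) : Bool :=
  if num = 0 then false
  else
    let p := int_listing num
    let digits := PySem.List.sorted p.1 (fun x => x) false
    if p.2 ≠ k + 1 then false
    else if adjScan k digits then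
      -- digits[num_len - 1] > k; digits is nonempty here, so the none branch is unreachable
      match PySem.List.pyGet? digits (p.2 - 1) with
      | some d => if d > k then false else true
      | none => false
    else false

-- ===== PORT B =====
-- same fuel convention as above: num.toNat + 1 steps always suffice for num ≥ 0
def digits_go (fuel : Nat) (n : Int) (acc : List Int) : List Int :=
  match fuel with
  | 0 => acc
  | fuel + 1 =>
    if n = 0 then acc
    else if 0 < n then
      digits_go fuel (PySem.Int.floordiv n 10) (acc ++ [PySem.Int.mod n 10])
    else acc  -- unreachable under Pre_ (Python would loop forever)

def seenScan (k : Int) : List Int → PySem.Set Int → Bool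
  | [], _ => true
  | d :: rest, seen =>
    if d > k || PySem.Set.contains seen d then false
    else seenScan k rest (PySem.Set.add seen d)

def is_good_k_alt (num : Int) (k : Int) : Bool :=
  if num = 0 then false
  else
    let digits := digits_go (num.toNat + 1) num []
    if (digits.length : Int) ≠ k + 1 then false
    else seenScan k digits PySem.Set.empty

-- ===== PRECONDITION & SPEC =====
-- Pre_ excludes num < 0, on which A's while-loop never terminates ('num //= 10' stalls at -1): A returns on no such input.
def Pre_is_good_k (num : Int) (k : Int) : Prop := 0 ≤ num
instance (num : Int) (k : Int) : Decidable (Pre_is_good_k num k) := by unfold Pre_is_good_k; infer_instance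
def pvWitness_is_good_k : Int × Int := (120, 2)
def Spec_is_good_k (num : Int) (k : Int) (out : Bool) : Prop := out = is_good_k_alt num k
instance (num : Int) (k : Int) (out : Bool) : Decidable (Spec_is_good_k num k out) := by unfold Spec_is_good_k; infer_instance

-- ===== CLAIM (what is proved, stated in full; the proofs are below) =====
def Claim_equal_is_good_k : Prop := ∀ (num : Int) (k : Int), Dom_is_good_k num k → Pre_is_good_k num k → Spec_is_good_k num k (is_good_k num k)

-- ===== LEMMAS AND PROOFS =====

-- extraction loops: the accumulator only grows
theorem digits_go_length_le : ∀ (fuel : Nat) (n : Int) (acc : List Int),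
    acc.length ≤ (digits_go fuel n acc).length := by
  intro fuel
  induction fuel with
  | zero => intro n acc; simp [digits_go]
  | succ fuel ih =>
    intro n acc
    rw [digits_go]
    split_ifs with h0 hp
    · exact le_refl _
    · have := ih (PySem.Int.floordiv n 10) (acc ++ [PySem.Int.mod n 10])
      simp only [List.length_append, List.length_cons, List.length_nil] at this
      omega
    · exact le_refl _

-- the two digit-extraction loops build the same list, and A's counter is B's length
theorem int_listing_go_eq : ∀ (fuel : Nat) (n : Int) (acc : List Int) (len : Int),
    int_listing_go fuel n acc len =
      (digits_go fuel n acc, len + (((digits_go fuel n acc).length - acc.length : Nat) : Int)) := by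
  intro fuel
  induction fuel with
  | zero => intro n acc len; simp [int_listing_go, digits_go]
  | succ fuel ih =>
    intro n acc len
    by_cases h0 : n = 0
    · simp [int_listing_go, digits_go, h0]
    · by_cases hp : 0 < n
      · rw [int_listing_go, if_neg h0, if_pos hp, ih, digits_go, if_neg h0, if_pos hp]
        have hle := digits_go_length_le fuel (PySem.Int.floordiv n 10) (acc ++ [PySem.Int.mod n 10])
        rw [List.length_append] at hle
        simp only [List.length_cons, List.length_nil] at hle
        congr 1
        simp only [List.length_append, List.length_cons, List.length_nil]
        omega
      · simp [int_listing_go, digits_go, h0, hp]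

-- B's seen-set pass accepts exactly the duplicate-free lists of elements ≤ k avoiding 'seen'
theorem seenScan_iff (k : Int) : ∀ (l : List Int) (seen : PySem.Set Int),
    seenScan k l seen = true ↔ l.Nodup ∧ (∀ d ∈ l, d ≤ k) ∧ (∀ d ∈ l, d ∉ seen) := by
  intro l
  induction l with
  | nil => intro seen; simp [seenScan]
  | cons d rest ih =>
    intro seen
    rw [seenScan]
    by_cases hk : d ≤ k
    · by_cases hs : d ∈ seen
      · rw [if_pos (by simp only [Bool.or_eq_true]; right; exact (PySem.Set.contains_iff seen d).mpr hs)]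
        constructor
        · intro h; exact absurd h (by simp)
        · rintro ⟨-, -, hns⟩; exact absurd hs (hns d (by simp))
      · rw [if_neg (by
            simp only [Bool.or_eq_true, decide_eq_true_eq, PySem.Set.contains_iff]
            rintro (h | h)
            · omega
            · exact hs h), ih]
        constructor
        · rintro ⟨hn, hle, hns⟩
          refine ⟨List.nodup_cons.mpr ⟨fun hmem => ?_, hn⟩, ?_, ?_⟩
          · exact (hns d hmem) (by rw [PySem.Set.mem_add]; right; rfl)
          · intro x hx
            rcases List.mem_cons.mp hx with hx | hx
            · subst hx; exact hk
            · exact hle x hx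
          · intro x hx hxs
            rcases List.mem_cons.mp hx with hx | hx
            · subst hx; exact hs hxs
            · exact (hns x hx) (by rw [PySem.Set.mem_add]; left; exact hxs)
        · rintro ⟨hnd, hle, hns⟩
          have hd := (List.nodup_cons.mp hnd).1
          have hn := (List.nodup_cons.mp hnd).2
          refine ⟨hn, fun x hx => hle x (List.mem_cons_of_mem _ hx), fun x hx hxadd => ?_⟩
          rw [PySem.Set.mem_add] at hxadd
          rcases hxadd with hxs | hxd
          · exact (hns x (List.mem_cons_of_mem _ hx)) hxs
          · exact hd (hxd ▸ hx)
    · rw [if_pos (by simp only [Bool.or_eq_true, decide_eq_true_eq]; left; omega)]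
      constructor
      · intro h; exact absurd h (by simp)
      · rintro ⟨-, hle, -⟩; exact absurd (hle d (by simp)) hk

-- A's adjacent-pair loop: all consecutive pairs distinct, and every non-last element ≤ k
theorem adjScan_iff (k : Int) : ∀ (l : List Int),
    adjScan k l = true ↔ l.IsChain (· ≠ ·) ∧ (∀ d ∈ l.dropLast, d ≤ k) := by
  intro l
  induction l with
  | nil => simp [adjScan]
  | cons a t ih =>
    cases t with
    | nil => simp [adjScan]
    | cons b rest =>
      rw [adjScan]
      by_cases hab : a = b
      · rw [if_pos (by simp [hab])]
        constructor
        · intro h; exact absurd h (by simp)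
        · rintro ⟨hch, -⟩; exact absurd hab (List.isChain_cons_cons.mp hch).1
      · by_cases hak : a ≤ k
        · rw [if_neg (by
              simp only [Bool.or_eq_true, beq_iff_eq, decide_eq_true_eq]
              rintro (h | h)
              · exact hab h
              · omega), ih]
          simp only [List.isChain_cons_cons, List.dropLast_cons₂, List.mem_cons]
          constructor
          · rintro ⟨hc, hd⟩
            refine ⟨⟨hab, hc⟩, fun x hx => ?_⟩
            rcases hx with hx | hx
            · subst hx; exact hak
            · exact hd x hx
          · rintro ⟨⟨-, hc⟩, hd⟩
            exact ⟨hc, fun x hx => hd x (Or.inr hx)⟩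
        · rw [if_pos (by simp only [Bool.or_eq_true, decide_eq_true_eq]; right; omega)]
          constructor
          · intro h; exact absurd h (by simp)
          · rintro ⟨-, hd⟩; exact absurd (hd a (by simp)) hak

-- sorted + adjacent-distinct gives a strictly increasing chain
theorem chain_lt_of_sorted_ne : ∀ (s : List Int), s.Pairwise (· ≤ ·) →
    s.IsChain (· ≠ ·) → s.IsChain (· < ·) := by
  intro s
  induction s with
  | nil => intro _ _; exact List.isChain_nil
  | cons a t ih =>
    cases t with
    | nil => intro _ _; exact List.isChain_singleton a
    | cons b r =>
      intro hpw hch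
      rw [List.isChain_cons_cons] at hch ⊢
      rw [List.pairwise_cons] at hpw
      exact ⟨lt_of_le_of_ne (hpw.1 b (by simp)) hch.1, ih hpw.2 hch.2⟩

-- A's tail (on the sorted list) and B's pass agree: both decide "nodup ∧ all elements ≤ k"
theorem tail_eq (k : Int) (l : List Int) (hne : l ≠ []) :
    (if adjScan k (PySem.List.sorted l (fun x => x) false) then
       match PySem.List.pyGet? (PySem.List.sorted l (fun x => x) false) ((l.length : Int) - 1) with
       | some d => if d > k then false else true
       | none => false
     else false) = seenScan k l PySem.Set.empty := by
  have hperm : (PySem.List.sorted l (fun x => x) false).Perm l := PySem.List.sorted_perm l _ _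
  have hpw : (PySem.List.sorted l (fun x => x) false).Pairwise (fun a b => a ≤ b) :=
    PySem.List.sorted_pairwise l (fun x => x)
  set s := PySem.List.sorted l (fun x => x) false with hs
  have hsl : s.length = l.length := hperm.length_eq
  have hsne : s ≠ [] := by
    intro h; rw [h] at hsl; exact hne (List.eq_nil_of_length_eq_zero hsl.symm)
  have hget : PySem.List.pyGet? s ((l.length : Int) - 1) = some (s.getLast hsne) := by
    have hpos : 0 < s.length := List.length_pos_iff.mpr hsne
    have h1 : ((l.length : Int) - 1) = ((s.length - 1 : Nat) : Int) := by omega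
    rw [h1, PySem.List.pyGet?_natCast, List.getLast_eq_getElem]
    exact List.getElem?_eq_getElem _
  rw [hget, Bool.eq_iff_iff, seenScan_iff]
  simp only [PySem.Set.empty, List.not_mem_nil, not_false_eq_true, implies_true, and_true]
  constructor
  · intro h
    by_cases h1 : adjScan k s = true
    · rw [if_pos h1] at h
      have h' : (if s.getLast hsne > k then false else true) = true := h
      by_cases h2 : s.getLast hsne > k
      · rw [if_pos h2] at h'; exact absurd h' (by simp)
      · -- adjScan passed and the last (greatest) element is ≤ k
        have hlast : s.getLast hsne ≤ k := by omega
        rw [adjScan_iff] at h1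
        obtain ⟨hch, hdl⟩ := h1
        have hall : ∀ d ∈ s, d ≤ k := by
          intro d hd
          have hmem : d ∈ s.dropLast ++ [s.getLast hsne] := by
            rw [List.dropLast_append_getLast hsne]; exact hd
          rcases List.mem_append.mp hmem with hd' | hd'
          · exact hdl d hd'
          · simp at hd'; omega
        have hnodup : s.Nodup :=
          (List.isChain_iff_pairwise.mp (chain_lt_of_sorted_ne s hpw hch)).imp ne_of_lt
        exact ⟨hperm.nodup_iff.mp hnodup, fun d hd => hall d (hperm.mem_iff.mpr hd)⟩
    · rw [if_neg h1] at h; exact absurd h (by simp)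
  · rintro ⟨hnd, hle⟩
    have hnds : s.Nodup := hperm.nodup_iff.mpr hnd
    have halls : ∀ d ∈ s, d ≤ k := fun d hd => hle d (hperm.mem_iff.mp hd)
    rw [if_pos (by
      rw [adjScan_iff]
      exact ⟨List.Pairwise.isChain hnds, fun d hd => halls d (List.dropLast_subset s hd)⟩)]
    show (if s.getLast hsne > k then false else true) = true
    rw [if_neg (by have := halls _ (List.getLast_mem hsne); omega)]

-- A with num ≠ 0, written over B's digit list (int_listing_go_eq applied)
theorem is_good_k_A_form (num k : Int) (h0 : num ≠ 0) :
    is_good_k num k =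
      (if ((digits_go (num.toNat + 1) num []).length : Int) ≠ k + 1 then false
       else if adjScan k (PySem.List.sorted (digits_go (num.toNat + 1) num []) (fun x => x) false) then
         match PySem.List.pyGet? (PySem.List.sorted (digits_go (num.toNat + 1) num []) (fun x => x) false)
             (((digits_go (num.toNat + 1) num []).length : Int) - 1) with
         | some d => if d > k then false else true
         | none => false
       else false) := by
  unfold is_good_k
  rw [if_neg h0, int_listing, if_neg h0, int_listing_go_eq]
  simp only [List.length_nil, Nat.sub_zero, zero_add]

theorem is_good_k_alt_form (num k : Int) (h0 : num ≠ 0) :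
    is_good_k_alt num k =
      (if ((digits_go (num.toNat + 1) num []).length : Int) ≠ k + 1 then false
       else seenScan k (digits_go (num.toNat + 1) num []) PySem.Set.empty) := by
  unfold is_good_k_alt
  rw [if_neg h0]

-- ===== VERDICT (by name: the statement is the Claim_ definition above) =====
theorem is_good_k_spec : Claim_equal_is_good_k := by
  intro num k _ hpre
  unfold Spec_is_good_k
  by_cases h0 : num = 0
  · simp [is_good_k, is_good_k_alt, h0]
  · rw [is_good_k_A_form num k h0, is_good_k_alt_form num k h0]
    set dg := digits_go (num.toNat + 1) num [] with hdg
    by_cases hlen : ((dg.length : Nat) : Int) ≠ k + 1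
    · rw [if_pos hlen, if_pos hlen]
    · rw [if_neg hlen, if_neg hlen]
      have hp : (0 : Int) < num := by
        rcases lt_or_eq_of_le hpre with h | h
        · exact h
        · exact absurd h.symm h0
      have hne : dg ≠ [] := by
        rw [hdg, digits_go, if_neg h0, if_pos hp]
        intro hh
        have hle := digits_go_length_le num.toNat (PySem.Int.floordiv num 10)
          ([] ++ [PySem.Int.mod num 10])
        rw [hh] at hle
        simp at hle
      exact tail_eq k dg hne
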